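-- pv_equiv track=rewrite | github.com/Icontee/wake | woke/development/pytypes_generator.py | _parse_opcodes
-- ===== SOURCE A (Python) =====
-- from typing import (
--     Any,
--     DefaultDict,
--     Dict,
--     FrozenSet,
--     Iterable,
--     List,
--     Optional,
--     Set,
--     Tuple,
--     Union,
-- )
--
-- def _parse_opcodes(opcodes: str) -> List[Tuple[int, str, int, Optional[int]]]:
--     pc_op_map = []
--     opcodes_spl = opcodes.split(" ")
--
--     pc = 0
--     ignore = False
--
--     for i, opcode in enumerate(opcodes_spl):
--         if ignore:
--             ignore = False
--             continue
--
--         if not opcode.startswith("PUSH"):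
--             pc_op_map.append((pc, opcode, 1, None))
--             pc += 1
--         else:
--             size = int(opcode[4:]) + 1
--             pc_op_map.append((pc, opcode, size, int(opcodes_spl[i + 1], 16)))
--             pc += size
--             ignore = True
--     return pc_op_map
-- ===== SOURCE B (Python) =====
-- def _parse_opcodes(opcodes: str):
--     # stage 1: structure only, no program counters; the iterator protocol
--     # consumes a PUSH's operand via next(it)
--     it = iter(opcodes.split(" "))
--     triples = []
--     for op in it:
--         if op.startswith("PUSH"):
--             size = int(op[4:]) + 1
--             triples.append((op, size, int(next(it), 16)))
--         else:
--             triples.append((op, 1, None))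
--     # stage 2: prefix sums of the sizes give the pcs
--     pcs = []
--     total = 0
--     for _, size, _ in triples:
--         pcs.append(total)
--         total += size
--     return [(pc, op, size, operand) for pc, (op, size, operand) in zip(pcs, triples)]
-- ===== Notes on version B (the rewrite author's own statement) =====
-- stated objective: alternative
-- what changed: A's single pc-carrying loop with an ignore flag is replaced by two staged passes: an iterator-based scan that builds (op, size, operand) triples with no program counters (the PUSH operand consumed via next(it)), followed by a prefix-sum pass over the sizes that is zipped back on to assign the pcs.
import Mathlib
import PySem

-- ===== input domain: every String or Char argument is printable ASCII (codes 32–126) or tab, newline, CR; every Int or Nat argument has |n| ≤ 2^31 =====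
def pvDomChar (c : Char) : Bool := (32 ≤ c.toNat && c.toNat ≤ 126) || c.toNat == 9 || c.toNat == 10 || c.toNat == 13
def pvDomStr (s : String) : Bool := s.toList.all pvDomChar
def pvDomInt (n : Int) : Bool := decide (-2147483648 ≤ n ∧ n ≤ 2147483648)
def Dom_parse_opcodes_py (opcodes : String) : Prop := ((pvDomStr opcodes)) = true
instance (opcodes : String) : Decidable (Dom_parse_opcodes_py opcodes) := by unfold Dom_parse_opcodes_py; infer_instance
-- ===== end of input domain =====

-- B replaces A's single pc-carrying loop with an ignore flag by two staged passes:
-- an iterator-style scan producing (op, size, operand) triples with no program counters,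
-- then a prefix-sum pass over the sizes zipped back on (alternative decomposition, same cost).

-- ===== PORT A =====
-- A's loop: enumerate with an `ignore` flag; the operand opcodes_spl[i+1] is the head of the
-- remaining list. `.getD` defaults stand where Python raises (ValueError/IndexError), which
-- Pre_parse_opcodes_py excludes.
def pvALoop : List String → Int → Bool → List (Int × String × Int × Option Int) → List (Int × String × Int × Option Int)
  | [], _, _, acc => acc
  | op :: rest, pc, ignore, acc =>
    if ignore then pvALoop rest pc false acc
    else if !(PySem.Str.startswith op "PUSH") then
      pvALoop rest (pc + 1) false (acc ++ [(pc, op, 1, none)])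
    else
      let size := (PySem.Int.ofStr? (PySem.Str.slice op (some 4) none)).getD 0 + 1
      let operand := (rest.head?.bind (fun t => PySem.Int.ofStrBase? t 16)).getD 0
      pvALoop rest (pc + size) true (acc ++ [(pc, op, size, some operand)])

def parse_opcodes_py (opcodes : String) : List (Int × String × Int × Option Int) :=
  pvALoop ((PySem.Str.split? opcodes " ").getD []) 0 false []

-- ===== PORT B =====
-- B stage 1: scan producing (op, size, operand) triples without program counters; a PUSH
-- consumes its operand via next(it). The `[]` in the PUSH branch is where Python raises
-- StopIteration (excluded by Pre_), the `.getD 0` where it raises ValueError (also excluded).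
def pvScan : List String → List (String × Int × Option Int)
  | [] => []
  | op :: rest =>
    if PySem.Str.startswith op "PUSH" then
      let size := (PySem.Int.ofStr? (PySem.Str.slice op (some 4) none)).getD 0 + 1
      match rest with
      | nxt :: rest' => (op, size, some ((PySem.Int.ofStrBase? nxt 16).getD 0)) :: pvScan rest'
      | [] => []
    else
      (op, 1, none) :: pvScan rest

-- B stage 2: the pcs are the prefix sums of the sizes.
def pvPcs : List (String × Int × Option Int) → Int → List Int
  | [], _ => []
  | (_, size, _) :: rest, total => total :: pvPcs rest (total + size)

def parse_opcodes_py_alt (opcodes : String) : List (Int × String × Int × Option Int) :=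
  let triples := pvScan ((PySem.Str.split? opcodes " ").getD [])
  -- zip of the pc list with the triples; the comprehension's tuple (pc, op, size, operand)
  -- is exactly the right-nested zip pair
  (pvPcs triples 0).zip triples

-- ===== PRECONDITION & SPEC =====
-- Every token starting with "PUSH" must have an int-parsable suffix and be followed by a
-- hex-parsable token: exactly the inputs where Python A returns (else ValueError/IndexError).
-- (A token actually consumed as a hex operand can never start with "PUSH", so this per-token
-- condition coincides with the set of inputs on which A returns normally.)
def pvPreTok : List String → Bool
  | [] => true
  | op :: rest =>
    (!(PySem.Str.startswith op "PUSH") ||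
      ((PySem.Int.ofStr? (PySem.Str.slice op (some 4) none)).isSome &&
        (match rest.head? with
         | some nxt => (PySem.Int.ofStrBase? nxt 16).isSome
         | none => false))) && pvPreTok rest

def Pre_parse_opcodes_py (opcodes : String) : Prop :=
  pvPreTok ((PySem.Str.split? opcodes " ").getD []) = true
instance (opcodes : String) : Decidable (Pre_parse_opcodes_py opcodes) := by
  unfold Pre_parse_opcodes_py; infer_instance

def pvWitness_parse_opcodes_py : String := "PUSH1 2a STOP"

def Spec_parse_opcodes_py (opcodes : String) (out : List (Int × String × Int × Option Int)) : Prop := out = parse_opcodes_py_alt opcodes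
instance (opcodes : String) (out : List (Int × String × Int × Option Int)) : Decidable (Spec_parse_opcodes_py opcodes out) := by unfold Spec_parse_opcodes_py; infer_instance

-- ===== CLAIM (what is proved, stated in full; the proofs are below) =====
def Claim_equal_parse_opcodes_py : Prop := ∀ (opcodes : String), Dom_parse_opcodes_py opcodes → Pre_parse_opcodes_py opcodes → Spec_parse_opcodes_py opcodes (parse_opcodes_py opcodes)

-- ===== LEMMAS AND PROOFS =====
lemma pvLoop_eq : ∀ (n : Nat) (spl : List String), spl.length ≤ n →
    ∀ (pc : Int) (acc : List (Int × String × Int × Option Int)),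
    pvPreTok spl = true →
    pvALoop spl pc false acc = acc ++ (pvPcs (pvScan spl) pc).zip (pvScan spl) := by
  intro n
  induction n with
  | zero =>
    intro spl hlen pc acc _
    have : spl = [] := List.eq_nil_of_length_eq_zero (Nat.le_zero.mp hlen)
    subst this; simp [pvALoop, pvScan, pvPcs]
  | succ n ih =>
    intro spl hlen pc acc hpre
    rcases spl with _ | ⟨op, rest⟩
    · simp [pvALoop, pvScan, pvPcs]
    · simp only [pvPreTok, Bool.and_eq_true, Bool.or_eq_true] at hpre
      obtain ⟨hop, hrest⟩ := hpre
      by_cases hp : PySem.Str.startswith op "PUSH" = true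
      · rcases hop with hop | hop
        · rw [hp] at hop; exact absurd hop (by decide)
        · obtain ⟨-, hnext⟩ := hop
          rcases rest with _ | ⟨nxt, rest'⟩
          · simp [List.head?] at hnext
          · have hpre' : pvPreTok rest' = true := by
              simp only [pvPreTok, Bool.and_eq_true] at hrest
              exact hrest.2
            have hlen' : rest'.length ≤ n := by
              simp only [List.length_cons] at hlen; omega
            simp only [pvALoop, pvScan, pvPcs, hp, Bool.not_true, Bool.false_eq_true, if_false,
              if_true, List.head?, List.zip, List.zipWith]
            rw [ih rest' hlen' _ _ hpre']
            simp [List.zip]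
      · simp only [Bool.not_eq_true] at hp
        have hlen' : rest.length ≤ n := by
          simp only [List.length_cons] at hlen; omega
        simp only [pvALoop, pvScan, pvPcs, hp, Bool.not_false, Bool.false_eq_true, if_false,
          if_true, List.zip, List.zipWith]
        rw [ih rest hlen' _ _ hrest]
        simp [List.zip]

-- ===== VERDICT (by name: the statement is the Claim_ definition above) =====
theorem parse_opcodes_py_spec : Claim_equal_parse_opcodes_py := by
  intro opcodes _ hpre
  unfold Spec_parse_opcodes_py parse_opcodes_py parse_opcodes_py_alt
  exact pvLoop_eq _ _ (le_refl _) 0 [] hpre
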